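-- pv_equiv track=rewrite | github.com/vinadsa/ASA | Hackerrank 3/sungjinwoo.py | hitung_lintas
-- ===== SOURCE A (Python) =====
-- def hitung_lintas(arr, awal, tengah, akhir):
--     jumlah = 0
--     # Cari pola (i, j, k) di mana i di bagian kiri, k di bagian kanan
--     # dan elemen arr[i] < arr[j] < arr[k]
--     for i in range(awal, tengah + 1):
--         for k in range(tengah + 1, akhir + 1):
--             if arr[i] < arr[k]:
--                 # Jika elemen i dan k meningkat, cek jika ada j di antaranya
--                 # yang memenuhi arr[i] < arr[j] < arr[k]
--                 for j in range(i + 1, k):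
--                     if arr[i] < arr[j] < arr[k]:
--                         jumlah += 1
--
--     return jumlah
-- ===== SOURCE B (Python) =====
-- def hitung_lintas(arr, awal, tengah, akhir):
--     # Middle-element decomposition: for each candidate middle index j,
--     # count left partners i (left half, i < j, arr[i] < arr[j]) and right
--     # partners k (right half, k > j, arr[k] > arr[j]); add their product.
--     if awal > tengah or tengah >= akhir:
--         return 0
--     total = 0
--     for j in range(awal + 1, akhir):
--         kiri = sum(1 for i in range(awal, min(tengah, j - 1) + 1) if arr[i] < arr[j])
--         kanan = sum(1 for k in range(max(tengah + 1, j + 1), akhir + 1) if arr[j] < arr[k])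
--         total += kiri * kanan
--     return total
-- ===== Notes on version B (the rewrite author's own statement) =====
-- stated objective: alternative
-- what changed: Replaces the triple loop over (i,k) pairs with an inner scan for j by a middle-element decomposition: one pass over each candidate middle index j multiplying the count of smaller left-half elements by the count of larger right-half elements.
import Mathlib
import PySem

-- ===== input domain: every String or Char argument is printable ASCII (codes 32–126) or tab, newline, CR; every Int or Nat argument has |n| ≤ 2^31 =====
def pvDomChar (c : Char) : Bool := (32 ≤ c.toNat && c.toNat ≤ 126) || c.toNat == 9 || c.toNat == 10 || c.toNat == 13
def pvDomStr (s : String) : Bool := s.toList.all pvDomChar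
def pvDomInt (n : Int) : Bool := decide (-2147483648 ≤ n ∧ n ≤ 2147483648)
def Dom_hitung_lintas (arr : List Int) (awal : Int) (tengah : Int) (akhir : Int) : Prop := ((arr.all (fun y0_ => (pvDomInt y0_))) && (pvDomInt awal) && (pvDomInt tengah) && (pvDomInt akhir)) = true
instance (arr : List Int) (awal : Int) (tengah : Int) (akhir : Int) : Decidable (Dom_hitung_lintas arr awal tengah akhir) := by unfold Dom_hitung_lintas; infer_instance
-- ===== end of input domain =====

-- B replaces A's (i,k)-pairs-with-inner-scan triple loop by a middle-element decomposition:
-- per middle index j, multiply the count of smaller left-half partners by larger right-half partners.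


-- ===== PORT A =====
def hitung_lintas (arr : List Int) (awal : Int) (tengah : Int) (akhir : Int) : Int :=
  (PySem.List.pyRange awal (tengah + 1) 1).foldl (fun jumlah i =>
    (PySem.List.pyRange (tengah + 1) (akhir + 1) 1).foldl (fun jumlah k =>
      if PySem.List.pyGetD arr i 0 < PySem.List.pyGetD arr k 0 then
        (PySem.List.pyRange (i + 1) k 1).foldl (fun jumlah j =>
          if PySem.List.pyGetD arr i 0 < PySem.List.pyGetD arr j 0 ∧
             PySem.List.pyGetD arr j 0 < PySem.List.pyGetD arr k 0 then jumlah + 1 else jumlah)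
          jumlah
      else jumlah) jumlah) 0

-- ===== PORT B =====
def hitung_lintas_alt (arr : List Int) (awal : Int) (tengah : Int) (akhir : Int) : Int :=
  if tengah < awal ∨ akhir ≤ tengah then 0
  else
    (PySem.List.pyRange (awal + 1) akhir 1).foldl (fun total j =>
      let kiri := (PySem.List.pyRange awal (min tengah (j - 1) + 1) 1).foldl
        (fun acc i => if PySem.List.pyGetD arr i 0 < PySem.List.pyGetD arr j 0 then acc + 1 else acc) 0
      let kanan := (PySem.List.pyRange (max (tengah + 1) (j + 1)) (akhir + 1) 1).foldl
        (fun acc k => if PySem.List.pyGetD arr j 0 < PySem.List.pyGetD arr k 0 then acc + 1 else acc) 0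
      total + kiri * kanan) 0

-- ===== PRECONDITION & SPEC =====
-- Pre_ is exactly the no-raise condition of A: whenever both outer loops are nonempty
-- (awal ≤ tengah < akhir) every index A uses lies in [-len, len); otherwise A raises IndexError.
def Pre_hitung_lintas (arr : List Int) (awal : Int) (tengah : Int) (akhir : Int) : Prop :=
  (awal ≤ tengah ∧ tengah < akhir) → (-(arr.length : Int) ≤ awal ∧ akhir < (arr.length : Int))
instance (arr : List Int) (awal : Int) (tengah : Int) (akhir : Int) : Decidable (Pre_hitung_lintas arr awal tengah akhir) := by unfold Pre_hitung_lintas; infer_instance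

def pvWitness_hitung_lintas : List Int × Int × Int × Int := ([3, 1, 2, 4], 0, 1, 3)

def Spec_hitung_lintas (arr : List Int) (awal : Int) (tengah : Int) (akhir : Int) (out : Int) : Prop := out = hitung_lintas_alt arr awal tengah akhir
instance (arr : List Int) (awal : Int) (tengah : Int) (akhir : Int) (out : Int) : Decidable (Spec_hitung_lintas arr awal tengah akhir out) := by unfold Spec_hitung_lintas; infer_instance

-- ===== CLAIM (what is proved, stated in full; the proofs are below) =====
def Claim_equal_hitung_lintas : Prop := ∀ (arr : List Int) (awal : Int) (tengah : Int) (akhir : Int), Dom_hitung_lintas arr awal tengah akhir → Pre_hitung_lintas arr awal tengah akhir → Spec_hitung_lintas arr awal tengah akhir (hitung_lintas arr awal tengah akhir)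

-- ===== LEMMAS AND PROOFS =====

-- sum of f over list(range(a, b)) is the Finset sum over Ico a b
theorem hl_sum_map_pyRange (f : Int → Int) (a b : Int) :
    ((PySem.List.pyRange a b 1).map f).sum = ∑ x ∈ Finset.Ico a b, f x := by
  by_cases h : b ≤ a
  · rw [PySem.List.pyRange_one_eq_nil h, Finset.Ico_eq_empty (by omega)]
    simp
  · have h' : a < b := by omega
    rw [PySem.List.pyRange_one_cons h', ← Finset.Ioo_insert_left h', Finset.sum_insert (by simp)]
    simp only [List.map_cons, List.sum_cons]
    rw [hl_sum_map_pyRange f (a + 1) b, Finset.Ico_add_one_left_eq_Ioo]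
termination_by (b - a).toNat
decreasing_by omega

-- a counting loop over range(a, b) is a 0/1 Finset sum
theorem hl_count_fold (p : Int → Prop) [DecidablePred p] (a b acc : Int) :
    (PySem.List.pyRange a b 1).foldl (fun n x => if p x then n + 1 else n) acc
      = acc + ∑ x ∈ Finset.Ico a b, (if p x then (1 : Int) else 0) := by
  rw [PySem.List.foldl_ite_add_one]
  congr 1
  rw [← PySem.List.sum_map_ite_one_zero, hl_sum_map_pyRange]
  simp

-- A as a triple Finset sum
theorem hl_A_eq (arr : List Int) (awal tengah akhir : Int) :
    hitung_lintas arr awal tengah akhir =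
      ∑ i ∈ Finset.Ico awal (tengah + 1), ∑ k ∈ Finset.Ico (tengah + 1) (akhir + 1),
        ∑ j ∈ Finset.Ico (i + 1) k,
          (if PySem.List.pyGetD arr i 0 < PySem.List.pyGetD arr j 0 ∧
              PySem.List.pyGetD arr j 0 < PySem.List.pyGetD arr k 0 then (1 : Int) else 0) := by
  unfold hitung_lintas
  rw [PySem.List.foldl_congr_mem _ _ (fun jumlah i => jumlah +
        ∑ k ∈ Finset.Ico (tengah + 1) (akhir + 1), ∑ j ∈ Finset.Ico (i + 1) k,
          (if PySem.List.pyGetD arr i 0 < PySem.List.pyGetD arr j 0 ∧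
              PySem.List.pyGetD arr j 0 < PySem.List.pyGetD arr k 0 then (1 : Int) else 0)) _ ?_]
  · rw [PySem.List.foldl_add, hl_sum_map_pyRange]
    simp
  · intro acc i _
    rw [PySem.List.foldl_congr_mem _ _ (fun jumlah k => jumlah +
          ∑ j ∈ Finset.Ico (i + 1) k,
            (if PySem.List.pyGetD arr i 0 < PySem.List.pyGetD arr j 0 ∧
                PySem.List.pyGetD arr j 0 < PySem.List.pyGetD arr k 0 then (1 : Int) else 0)) _ ?_]
    · rw [PySem.List.foldl_add, hl_sum_map_pyRange]
    · intro acc' k _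
      by_cases h : PySem.List.pyGetD arr i 0 < PySem.List.pyGetD arr k 0
      · simp only [h, if_true]
        rw [hl_count_fold]
      · simp only [h, if_false]
        have : (∑ j ∈ Finset.Ico (i + 1) k,
            (if PySem.List.pyGetD arr i 0 < PySem.List.pyGetD arr j 0 ∧
                PySem.List.pyGetD arr j 0 < PySem.List.pyGetD arr k 0 then (1 : Int) else 0)) = 0 := by
          apply Finset.sum_eq_zero
          intro j _
          have : ¬ (PySem.List.pyGetD arr i 0 < PySem.List.pyGetD arr j 0 ∧
              PySem.List.pyGetD arr j 0 < PySem.List.pyGetD arr k 0) := by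
            rintro ⟨h1, h2⟩; exact h (h1.trans h2)
          simp [this]
        rw [this, add_zero]

-- B as a guarded Finset sum of products
theorem hl_B_eq (arr : List Int) (awal tengah akhir : Int) :
    hitung_lintas_alt arr awal tengah akhir =
      if tengah < awal ∨ akhir ≤ tengah then 0
      else
        ∑ j ∈ Finset.Ico (awal + 1) akhir,
          (∑ i ∈ Finset.Ico awal (min tengah (j - 1) + 1),
              (if PySem.List.pyGetD arr i 0 < PySem.List.pyGetD arr j 0 then (1 : Int) else 0)) *
          (∑ k ∈ Finset.Ico (max (tengah + 1) (j + 1)) (akhir + 1),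
              (if PySem.List.pyGetD arr j 0 < PySem.List.pyGetD arr k 0 then (1 : Int) else 0)) := by
  unfold hitung_lintas_alt
  split_ifs with hg
  · rfl
  · rw [PySem.List.foldl_congr_mem _ _ (fun total j => total +
        (∑ i ∈ Finset.Ico awal (min tengah (j - 1) + 1),
            (if PySem.List.pyGetD arr i 0 < PySem.List.pyGetD arr j 0 then (1 : Int) else 0)) *
        (∑ k ∈ Finset.Ico (max (tengah + 1) (j + 1)) (akhir + 1),
            (if PySem.List.pyGetD arr j 0 < PySem.List.pyGetD arr k 0 then (1 : Int) else 0))) _ ?_]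
    · rw [PySem.List.foldl_add, hl_sum_map_pyRange]
      simp
    · intro acc j _
      simp only [hl_count_fold, zero_add]

-- the combinatorial core: summing over the middle index j first
theorem hl_core (v : Int → Int) (awal tengah akhir : Int) :
    (∑ i ∈ Finset.Ico awal (tengah + 1), ∑ k ∈ Finset.Ico (tengah + 1) (akhir + 1),
        ∑ j ∈ Finset.Ico (i + 1) k, (if v i < v j ∧ v j < v k then (1 : Int) else 0)) =
      ∑ j ∈ Finset.Ico (awal + 1) akhir,
        (∑ i ∈ Finset.Ico awal (min tengah (j - 1) + 1), (if v i < v j then (1 : Int) else 0)) *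
        (∑ k ∈ Finset.Ico (max (tengah + 1) (j + 1)) (akhir + 1), (if v j < v k then (1 : Int) else 0)) := by
  have hRHS : ∀ j : Int,
      (∑ i ∈ Finset.Ico awal (min tengah (j - 1) + 1), (if v i < v j then (1 : Int) else 0)) *
      (∑ k ∈ Finset.Ico (max (tengah + 1) (j + 1)) (akhir + 1), (if v j < v k then (1 : Int) else 0))
      = ∑ i ∈ Finset.Ico awal (tengah + 1), ∑ k ∈ Finset.Ico (tengah + 1) (akhir + 1),
          (if i < j ∧ j < k then (if v i < v j ∧ v j < v k then (1 : Int) else 0) else 0) := by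
    intro j
    have hI : Finset.Ico awal (min tengah (j - 1) + 1)
        = (Finset.Ico awal (tengah + 1)).filter (fun i => i < j) := by
      ext x; simp only [Finset.mem_Ico, Finset.mem_filter]; omega
    have hK : Finset.Ico (max (tengah + 1) (j + 1)) (akhir + 1)
        = (Finset.Ico (tengah + 1) (akhir + 1)).filter (fun k => j < k) := by
      ext x; simp only [Finset.mem_Ico, Finset.mem_filter]; omega
    rw [hI, hK, Finset.sum_filter, Finset.sum_filter, Finset.sum_mul_sum]
    apply Finset.sum_congr rfl
    intro i _
    apply Finset.sum_congr rfl
    intro k _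
    by_cases hij : i < j <;> by_cases hjk : j < k <;>
      by_cases h1 : v i < v j <;> by_cases h2 : v j < v k <;>
      simp [hij, hjk, h1, h2]
  rw [Finset.sum_congr rfl (fun j _ => hRHS j)]
  have hL : (∑ i ∈ Finset.Ico awal (tengah + 1), ∑ k ∈ Finset.Ico (tengah + 1) (akhir + 1),
      ∑ j ∈ Finset.Ico (i + 1) k, (if v i < v j ∧ v j < v k then (1 : Int) else 0))
      = ∑ i ∈ Finset.Ico awal (tengah + 1), ∑ k ∈ Finset.Ico (tengah + 1) (akhir + 1),
          ∑ j ∈ Finset.Ico (awal + 1) akhir,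
            (if i < j ∧ j < k then (if v i < v j ∧ v j < v k then (1 : Int) else 0) else 0) := by
    apply Finset.sum_congr rfl
    intro i hi
    apply Finset.sum_congr rfl
    intro k hk
    have hJ : Finset.Ico (i + 1) k
        = (Finset.Ico (awal + 1) akhir).filter (fun j => i < j ∧ j < k) := by
      simp only [Finset.mem_Ico] at hi hk
      ext x; simp only [Finset.mem_Ico, Finset.mem_filter]; omega
    rw [hJ, Finset.sum_filter]
  rw [hL]
  rw [Finset.sum_congr rfl (fun i (_ : i ∈ Finset.Ico awal (tengah + 1)) =>
    (Finset.sum_comm (s := Finset.Ico (tengah + 1) (akhir + 1))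
      (t := Finset.Ico (awal + 1) akhir)
      (f := fun k j => if i < j ∧ j < k then (if v i < v j ∧ v j < v k then (1 : Int) else 0) else 0)))]
  rw [Finset.sum_comm]

-- ===== VERDICT (by name: the statement is the Claim_ definition above) =====
theorem hitung_lintas_spec : Claim_equal_hitung_lintas := by
  intro arr awal tengah akhir _ _
  unfold Spec_hitung_lintas
  rw [hl_A_eq, hl_B_eq, hl_core (fun t => PySem.List.pyGetD arr t 0)]
  split_ifs with hg
  · apply Finset.sum_eq_zero
    intro j _
    rcases hg with hg | hg
    · rw [Finset.Ico_eq_empty (by omega : ¬ awal < min tengah (j - 1) + 1)]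
      simp
    · rw [Finset.Ico_eq_empty (by omega : ¬ max (tengah + 1) (j + 1) < akhir + 1)]
      simp
  · rfl
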